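-- pv_equiv track=rewrite | github.com/adamnew123456/wiki-server | cleaner/clean-wiki.py | make_printable
-- ===== SOURCE A (Python) =====
-- def make_printable(text):
--     """
--     Strips out all non-printable characters from the text, including:
--
--     - 0x00 - 0x20, excluding CR, LF and tab
--     - 0x7F
--     """
--     buffer = []
--     for ch in text:
--         if ch in '\r\n':
--             buffer.append(ch)
--         else:
--             ord_ch = ord(ch)
--             if ord_ch != 0x7F and ord_ch >= 0x20:
--                 buffer.append(ch)
--
--     return ''.join(buffer)
-- ===== SOURCE B (Python) =====
-- # Precomputed deletion table + one str.translate pass instead of a per-char branch-and-append loop.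
-- _DEL_TABLE = {c: None for c in range(0x20) if c not in (10, 13)}
-- _DEL_TABLE[0x7F] = None
--
-- def make_printable(text):
--     return text.translate(_DEL_TABLE)
-- ===== Notes on version B (the rewrite author's own statement) =====
-- stated objective: idiomatic
-- what changed: Replaced the explicit per-character branch-and-append loop with a precomputed codepoint-deletion table applied in a single str.translate pass.
import Mathlib
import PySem

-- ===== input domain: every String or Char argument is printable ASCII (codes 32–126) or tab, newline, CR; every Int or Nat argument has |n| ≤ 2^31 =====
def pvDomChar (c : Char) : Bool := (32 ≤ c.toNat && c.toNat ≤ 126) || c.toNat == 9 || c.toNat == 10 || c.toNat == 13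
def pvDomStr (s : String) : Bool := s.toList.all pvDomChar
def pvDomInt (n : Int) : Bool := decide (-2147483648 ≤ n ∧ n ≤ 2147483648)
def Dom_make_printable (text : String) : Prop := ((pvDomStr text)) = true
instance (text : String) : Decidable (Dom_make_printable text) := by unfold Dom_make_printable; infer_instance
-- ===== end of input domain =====

-- B replaces A's per-character branch-and-append loop with a precomputed deletion table and one filtering pass (idiomatic; same deletion predicate).
-- ===== PORT A =====
-- buffer loop: append ch when ch in '\r\n' or (ord != 0x7F and ord >= 0x20)
def make_printable (text : String) : String :=
  let buffer : List Char :=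
    text.toList.foldl
      (fun buffer ch =>
        if ch = '\r' ∨ ch = '\n' then buffer ++ [ch]
        else if ch.toNat ≠ 0x7F ∧ 0x20 ≤ ch.toNat then buffer ++ [ch]
        else buffer) []
  String.mk buffer

-- ===== PORT B =====
-- the precomputed deletion table of Source B: codepoints mapped to None (deleted)
def pvDelTable : List Nat := ((List.range 0x20).filter (fun c => c ≠ 10 ∧ c ≠ 13)) ++ [0x7F]

-- text.translate(_DEL_TABLE): one pass dropping each char whose codepoint is in the table
def make_printable_alt (text : String) : String :=
  String.mk (text.toList.filter (fun ch => ¬ ch.toNat ∈ pvDelTable))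

-- ===== PRECONDITION & SPEC =====
def Spec_make_printable (text : String) (out : String) : Prop := out = make_printable_alt text
instance (text : String) (out : String) : Decidable (Spec_make_printable text out) := by unfold Spec_make_printable; infer_instance

-- ===== CLAIM (what is proved, stated in full; the proofs are below) =====
def Claim_equal_make_printable : Prop := ∀ (text : String), Dom_make_printable text → Spec_make_printable text (make_printable text)

-- ===== LEMMAS AND PROOFS =====

-- ===== VERDICT (by name: the statement is the Claim_ definition above) =====
theorem char_eq_iff_toNat (ch c : Char) : ch = c ↔ ch.toNat = c.toNat := by
  constructor
  · rintro rfl; rfl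
  · intro h; exact Char.ext (UInt32.toNat_inj.mp h)

theorem mem_pvDelTable_iff (n : Nat) :
    n ∈ pvDelTable ↔ ((n < 32 ∧ n ≠ 10 ∧ n ≠ 13) ∨ n = 127) := by
  have h : pvDelTable = [0,1,2,3,4,5,6,7,8,9,11,12,14,15,16,17,18,19,20,21,22,23,24,25,26,27,28,29,30,31,127] := by decide
  rw [h]
  simp only [List.mem_cons, List.not_mem_nil, or_false]
  omega

theorem keep_iff (c : Char) :
    ¬ c.toNat ∈ pvDelTable ↔ ((c = '\r' ∨ c = '\n') ∨ (c.toNat ≠ 0x7F ∧ 0x20 ≤ c.toNat)) := by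
  rw [mem_pvDelTable_iff, char_eq_iff_toNat c '\r', char_eq_iff_toNat c '\n']
  show _ ↔ (c.toNat = 13 ∨ c.toNat = 10) ∨ _
  omega

theorem foldA_eq (l : List Char) (acc : List Char) :
    l.foldl (fun buffer ch =>
        if ch = '\r' ∨ ch = '\n' then buffer ++ [ch]
        else if ch.toNat ≠ 0x7F ∧ 0x20 ≤ ch.toNat then buffer ++ [ch]
        else buffer) acc
      = acc ++ l.filter (fun ch => ¬ ch.toNat ∈ pvDelTable) := by
  induction l generalizing acc with
  | nil => simp
  | cons c l ih =>
    simp only [List.foldl_cons, List.filter_cons]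
    by_cases h : (c = '\r' ∨ c = '\n') ∨ (c.toNat ≠ 0x7F ∧ 0x20 ≤ c.toNat)
    · have hd : decide (¬ c.toNat ∈ pvDelTable) = true := by
        simp [keep_iff c, h]
      rw [hd]
      rcases h with h1 | h2
      · rw [if_pos h1, ih]; simp
      · by_cases h1 : c = '\r' ∨ c = '\n'
        · rw [if_pos h1, ih]; simp
        · rw [if_neg h1, if_pos h2, ih]; simp
    · have hd : decide (¬ c.toNat ∈ pvDelTable) = false := by
        simp only [decide_eq_false_iff_not]
        rw [keep_iff c]; exact h
      rw [hd]
      rw [if_neg (fun h1 => h (Or.inl h1)), if_neg (fun h2 => h (Or.inr h2)), ih]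
      simp
theorem make_printable_spec : Claim_equal_make_printable := by
  intro text _
  show make_printable text = make_printable_alt text
  unfold make_printable make_printable_alt
  rw [foldA_eq]
  simp
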